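-- pv_equiv track=rewrite | github.com/AzyzHm/CodeForces-Problems- | python/Triple Operations.py | min_op
-- ===== SOURCE A (Python) =====
-- def min_op(l, r):
--     def ops_to_zero(x):
--         count = 0
--         while x > 0:
--             x = x // 3
--             count += 1
--         return count
--
--     ops = 0
--     for number in range(l, r + 1):
--         ops += ops_to_zero(number)
--     return ops
-- ===== SOURCE B (Python) =====
-- def min_op(l, r):
--     # Closed-form band count: every x with 3**(k-1) <= x < 3**k needs exactly k
--     # divisions by 3 to reach 0, so sum the bands instead of iterating the range.
--     def prefix(n):
--         # sum of step counts for 1..n (0 if n <= 0)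
--         total = 0
--         p = 1  # 3**(k-1)
--         k = 1
--         while p <= n:
--             hi = min(n, 3 * p - 1)
--             total += k * (hi - p + 1)
--             p *= 3
--             k += 1
--         return total
--
--     if l > r:
--         return 0
--     return prefix(r) - prefix(l - 1)
-- ===== Notes on version B (the rewrite author's own statement) =====
-- stated objective: faster
-- what changed: Replaces the per-number loop of repeated floor divisions with a closed-form prefix sum that counts integers per base-3 magnitude band, answering as prefix(r) - prefix(l-1).
import Mathlib
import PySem

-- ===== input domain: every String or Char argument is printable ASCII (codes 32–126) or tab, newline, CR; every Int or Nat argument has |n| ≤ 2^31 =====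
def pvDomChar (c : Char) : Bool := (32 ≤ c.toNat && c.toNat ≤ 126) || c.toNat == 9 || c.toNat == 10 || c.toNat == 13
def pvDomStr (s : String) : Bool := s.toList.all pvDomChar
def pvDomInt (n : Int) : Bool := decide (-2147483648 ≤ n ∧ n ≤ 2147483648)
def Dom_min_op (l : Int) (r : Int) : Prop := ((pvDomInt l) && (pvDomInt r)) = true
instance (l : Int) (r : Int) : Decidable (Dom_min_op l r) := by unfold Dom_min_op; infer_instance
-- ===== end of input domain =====

-- B replaces A's per-number repeated division with a closed-form prefix sum over
-- base-3 magnitude bands (objective: faster, asymptotic).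

-- ===== PORT A =====
-- while x > 0: x = x // 3; count += 1
def opsToZero (x : Int) : Int :=
  if _h : 0 < x then opsToZero (PySem.Int.floordiv x 3) + 1 else 0
termination_by x.toNat
decreasing_by
  have h3 : PySem.Int.floordiv x 3 = x / 3 := PySem.Int.floordiv_eq_ediv_of_pos (by omega)
  rw [h3]; omega

def min_op (l : Int) (r : Int) : Int :=
  (PySem.List.pyRange l (r + 1) 1).foldl (fun ops number => ops + opsToZero number) 0

-- ===== PORT B =====
-- the while loop of prefix(n): p = 3**(k-1); the '0 < p' conjunct only makes the
-- recursion total (every call site has p ≥ 1, as in the Python)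
def prefixLoop (n p k total : Int) : Int :=
  if h : 0 < p ∧ p ≤ n then
    prefixLoop n (p * 3) (k + 1) (total + k * (min n (3 * p - 1) - p + 1))
  else total
termination_by (n + 1 - p).toNat
decreasing_by omega

def pyPrefix (n : Int) : Int := prefixLoop n 1 1 0

def min_op_alt (l : Int) (r : Int) : Int :=
  if l > r then 0 else pyPrefix r - pyPrefix (l - 1)

-- ===== PRECONDITION & SPEC =====
def Spec_min_op (l : Int) (r : Int) (out : Int) : Prop := out = min_op_alt l r
instance (l : Int) (r : Int) (out : Int) : Decidable (Spec_min_op l r out) := by unfold Spec_min_op; infer_instance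

-- ===== CLAIM (what is proved, stated in full; the proofs are below) =====
def Claim_equal_min_op : Prop := ∀ (l : Int) (r : Int), Dom_min_op l r → Spec_min_op l r (min_op l r)

-- ===== LEMMAS AND PROOFS =====

-- T n = Σ_{x=1..n} opsToZero x, the common reference sum
def T (n : Int) : Int :=
  if _h : 0 < n then T (n - 1) + opsToZero n else 0
termination_by n.toNat
decreasing_by omega

theorem opsToZero_nonpos {x : Int} (h : x ≤ 0) : opsToZero x = 0 := by
  rw [opsToZero]; simp [show ¬ 0 < x by omega]

theorem T_nonpos {n : Int} (h : n ≤ 0) : T n = 0 := by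
  rw [T]; simp [show ¬ 0 < n by omega]

theorem T_succ {n : Int} (h : 0 < n) : T n = T (n - 1) + opsToZero n := by
  rw [T]; simp [h]

-- every x in band [3^k, 3^(k+1)) takes exactly k+1 steps
theorem opsToZero_band (k : Nat) : ∀ x : Int, (3:Int)^k ≤ x → x < 3^(k+1) → opsToZero x = k + 1 := by
  induction k with
  | zero =>
    intro x h1 h2
    rw [opsToZero]
    have hx : 0 < x := by omega
    have h3 : PySem.Int.floordiv x 3 = x / 3 := PySem.Int.floordiv_eq_ediv_of_pos (by omega)
    have : x / 3 = 0 := by omega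
    simp [hx, this, opsToZero_nonpos (by omega : (0:Int) ≤ 0)]
  | succ k ih =>
    intro x h1 h2
    rw [opsToZero]
    have hx : 0 < x := by
      have : (0:Int) < 3^(k+1) := by positivity
      omega
    have h3 : PySem.Int.floordiv x 3 = x / 3 := PySem.Int.floordiv_eq_ediv_of_pos (by omega)
    have hp1 : (3:Int)^(k+1) = 3^k * 3 := by ring
    have hp2 : (3:Int)^(k+2) = 3^(k+1) * 3 := by ring
    have hq1 : (3:Int)^k ≤ x / 3 := by
      rw [hp1] at h1; omega
    have hq2 : x / 3 < 3^(k+1) := by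
      rw [hp2] at h2; omega
    rw [dif_pos hx, h3, ih _ hq1 hq2]
    push_cast; ring

-- telescoping T over a single band: all values count k+1
theorem T_band (k : Nat) : ∀ m : Nat, ∀ a b : Int, (3:Int)^k - 1 ≤ a → a ≤ b → b ≤ 3^(k+1) - 1 →
    (b - a).toNat = m → T b - T a = (k + 1) * (b - a) := by
  intro m
  induction m with
  | zero => intro a b _ h2 _ hm; have : a = b := by omega
            subst this; ring
  | succ m ih =>
    intro a b h1 h2 h3 hm
    have hb : 0 < b := by
      have : (0:Int) < 3^k := by positivity
      omega
    have hops : opsToZero b = k + 1 := opsToZero_band k b (by omega) (by omega)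
    have := ih a (b - 1) h1 (by omega) (by omega) (by omega)
    rw [T_succ hb, hops]
    push_cast at this ⊢
    linarith

-- loop invariant: starting the band loop at p = 3^k with weight k+1 adds the tail of T
theorem prefixLoop_eq : ∀ m : Nat, ∀ (k : Nat) (n t : Int), (n + 1 - 3^k).toNat = m →
    prefixLoop n (3^k) (k + 1) t = t + T n - T (min n (3^k - 1)) := by
  intro m
  induction m using Nat.strong_induction_on with
  | _ m ih =>
    intro k n t hm
    rw [prefixLoop]
    have hp : (0:Int) < 3^k := by positivity
    by_cases hle : (3:Int)^k ≤ n
    · rw [dif_pos ⟨hp, hle⟩]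
      have hmin : min n ((3:Int)^k - 1) = 3^k - 1 := by omega
      have hpow : (3:Int)^(k+1) = 3 * 3^k := by ring
      have hband : T (min n (3 * 3^k - 1)) - T (3^k - 1)
          = ((k:Int) + 1) * (min n (3 * 3^k - 1) - (3^k - 1)) := by
        apply T_band k (min n (3 * 3^k - 1) - (3^k - 1)).toNat
        · omega
        · have : (0:Int) < 3^(k+1) := by positivity
          rw [hpow] at this; omega
        · rw [hpow]; omega
        · rfl
      have hlt : (n + 1 - 3^(k+1)).toNat < m := by rw [hpow]; omega
      have hrec := ih (n + 1 - 3^(k+1)).toNat hlt (k+1)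
        n (t + ((k:Int) + 1) * (min n (3 * 3^k - 1) - 3^k + 1)) rfl
      rw [show (3:Int)^k * 3 = 3^(k+1) by ring,
          show ((k:Int) + 1) + 1 = ((k+1 : Nat) : Int) + 1 by push_cast; ring, hrec]
      rw [hmin, hpow]
      linarith [hband]
    · rw [dif_neg (by omega)]
      have : min n ((3:Int)^k - 1) = n := by omega
      rw [this]; ring

theorem pyPrefix_eq_T (n : Int) : pyPrefix n = T n := by
  have h := prefixLoop_eq (n + 1 - 3^0).toNat 0 n 0 rfl
  simp only [pow_zero, Nat.cast_zero, zero_add] at h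
  rw [pyPrefix, h]
  have : min n ((1:Int) - 1) ≤ 0 := by omega
  rw [T_nonpos this]; ring

-- A's fold telescopes to T r - T (min r (l-1))
theorem foldA_eq : ∀ m : Nat, ∀ l r t : Int, (r + 1 - l).toNat = m →
    (PySem.List.pyRange l (r + 1) 1).foldl (fun ops number => ops + opsToZero number) t
      = t + T r - T (min r (l - 1)) := by
  intro m
  induction m with
  | zero =>
    intro l r t hm
    have hempty : PySem.List.pyRange l (r + 1) 1 = [] := by
      rw [PySem.List.pyRange_one]
      simp [show (r + 1 - l).toNat = 0 from hm]
    rw [hempty]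
    have : min r (l - 1) = r := by omega
    simp [this]
  | succ m ih =>
    intro l r t hm
    have hlt : l < r + 1 := by omega
    rw [PySem.List.pyRange_one_cons hlt]
    simp only [List.foldl_cons]
    rw [ih (l + 1) r (t + opsToZero l) (by omega)]
    have hmin : min r (l + 1 - 1) = l := by omega
    rw [hmin]
    by_cases hl : 0 < l
    · have : min r (l - 1) = l - 1 := by omega
      rw [this, T_succ hl]; ring
    · have h1 : T l = 0 := T_nonpos (by omega)
      have h2 : T (min r (l - 1)) = 0 := T_nonpos (by omega)
      rw [h1, h2, opsToZero_nonpos (by omega)]; ring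

-- ===== VERDICT (by name: the statement is the Claim_ definition above) =====
theorem min_op_spec : Claim_equal_min_op := by
  intro l r _
  unfold Spec_min_op min_op min_op_alt
  rw [foldA_eq (r + 1 - l).toNat l r 0 rfl, pyPrefix_eq_T, pyPrefix_eq_T]
  by_cases h : l > r
  · rw [if_pos h]
    have : min r (l - 1) = r := by omega
    rw [this]; ring
  · rw [if_neg h]
    have : min r (l - 1) = l - 1 := by omega
    rw [this]; ring
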